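-- pv_equiv track=rewrite | github.com/MakarRybkin/Leetcode | main_algorithms/scanline.py | numberOfSegmentsForAllSegments
-- ===== SOURCE A (Python) =====
-- from bisect import bisect_right, bisect_left
--
-- def numberOfSegmentsForAllSegments(lr):
--     l_sorted = []
--     r_sorted = []
--     for (l, r) in lr:
--         l_sorted.append(l)
--         r_sorted.append(r)
--     l_sorted.sort()
--     r_sorted.sort()
--     results = {}
--     for (l, r) in lr:
--         results[(l, r)] = bisect_right(l_sorted, r) - 1 - bisect_left(r_sorted, l)
--     return results
-- ===== SOURCE B (Python) =====
-- def numberOfSegmentsForAllSegments(lr):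
--     # Direct counting: segment (l2, r2) overlaps (l, r) iff l2 <= r and r2 >= l;
--     # value = #{l2 <= r} - #{r2 < l} - 1, computed by plain scans, no sorting/bisect.
--     results = {}
--     for (l, r) in lr:
--         le = 0
--         lt = 0
--         for (l2, r2) in lr:
--             if l2 <= r:
--                 le += 1
--             if r2 < l:
--                 lt += 1
--         results[(l, r)] = le - lt - 1
--     return results
-- ===== Notes on version B (the rewrite author's own statement) =====
-- stated objective: simpler
-- what changed: Replaces the two sorted endpoint arrays and bisect_right/bisect_left binary searches with a single pass that, for each segment, counts left endpoints <= r and right endpoints < l by a plain scan of the list.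
import Mathlib
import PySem

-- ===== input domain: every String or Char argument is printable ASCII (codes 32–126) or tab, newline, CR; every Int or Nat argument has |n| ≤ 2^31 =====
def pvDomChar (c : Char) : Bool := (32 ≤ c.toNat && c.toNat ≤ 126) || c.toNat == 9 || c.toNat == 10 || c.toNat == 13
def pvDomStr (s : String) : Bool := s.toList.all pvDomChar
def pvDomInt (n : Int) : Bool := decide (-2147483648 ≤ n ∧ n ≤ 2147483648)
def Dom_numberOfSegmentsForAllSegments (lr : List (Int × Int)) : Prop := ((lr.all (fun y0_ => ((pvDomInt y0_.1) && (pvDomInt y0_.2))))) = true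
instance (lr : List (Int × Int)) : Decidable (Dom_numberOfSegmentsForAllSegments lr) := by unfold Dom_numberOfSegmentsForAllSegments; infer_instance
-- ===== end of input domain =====

-- B replaces the sorted endpoint arrays + bisect queries of A by plain counting scans
-- (simpler, no sorting/binary search); same return value for every input.

-- ===== PORT A =====
def numberOfSegmentsForAllSegments (lr : List (Int × Int)) : List (Int × Int × Int) :=
  let ls := lr.foldl (fun (p : List Int × List Int) s => (p.1 ++ [s.1], p.2 ++ [s.2])) ([], [])
  let l_sorted := PySem.List.sorted ls.1 (fun x => x) false
  let r_sorted := PySem.List.sorted ls.2 (fun x => x) false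
  let results : PySem.Dict (Int × Int) Int := lr.foldl
    (fun d s => d.insert s ((PySem.List.bisectRight l_sorted s.2 : Int) - 1 - (PySem.List.bisectLeft r_sorted s.1 : Int)))
    ⟨[]⟩
  results.items.map (fun kv => (kv.1.1, kv.1.2, kv.2))

-- ===== PORT B =====
def numberOfSegmentsForAllSegments_alt (lr : List (Int × Int)) : List (Int × Int × Int) :=
  let results : PySem.Dict (Int × Int) Int := lr.foldl
    (fun d s =>
      let c := lr.foldl
        (fun (c : Int × Int) t =>
          ((if t.1 ≤ s.2 then c.1 + 1 else c.1), (if t.2 < s.1 then c.2 + 1 else c.2)))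
        (0, 0)
      d.insert s (c.1 - c.2 - 1))
    ⟨[]⟩
  results.items.map (fun kv => (kv.1.1, kv.1.2, kv.2))

-- ===== PRECONDITION & SPEC =====
def Spec_numberOfSegmentsForAllSegments (lr : List (Int × Int)) (out : List (Int × Int × Int)) : Prop := out = numberOfSegmentsForAllSegments_alt lr
instance (lr : List (Int × Int)) (out : List (Int × Int × Int)) : Decidable (Spec_numberOfSegmentsForAllSegments lr out) := by unfold Spec_numberOfSegmentsForAllSegments; infer_instance

-- ===== CLAIM (what is proved, stated in full; the proofs are below) =====
def Claim_equal_numberOfSegmentsForAllSegments : Prop := ∀ (lr : List (Int × Int)), Dom_numberOfSegmentsForAllSegments lr → Spec_numberOfSegmentsForAllSegments lr (numberOfSegmentsForAllSegments lr)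

-- ===== LEMMAS AND PROOFS =====

-- A's endpoint-collecting loop builds the two projection lists.
theorem pv_endpoints (lr : List (Int × Int)) (a b : List Int) :
    lr.foldl (fun (p : List Int × List Int) s => (p.1 ++ [s.1], p.2 ++ [s.2])) (a, b)
      = (a ++ lr.map Prod.fst, b ++ lr.map Prod.snd) := by
  induction lr generalizing a b with
  | nil => simp
  | cons h t ih => simp [List.foldl_cons, ih]

-- bisect_right on a sorted list counts the elements ≤ x.
theorem pv_bisectRight_countP (xs : List Int) (x : Int)
    (hs : xs.Pairwise (fun a b => a ≤ b)) :
    PySem.List.bisectRight xs x = xs.countP (fun a => a ≤ x) := by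
  obtain ⟨hk, h1, h2⟩ := PySem.List.bisectRight_spec xs x hs
  set k := PySem.List.bisectRight xs x with hkdef
  rw [← List.take_append_drop k xs, List.countP_append]
  have ht : (xs.take k).countP (fun a => a ≤ x) = (xs.take k).length := by
    rw [List.countP_eq_length]
    intro a ha
    obtain ⟨i, hi, he⟩ := List.getElem_of_mem ha
    have hi' : i < k ∧ i < xs.length := by simpa using hi
    have hil : i < xs.length := hi'.2
    have := h1 i hil hi'.1
    simp only [List.getElem_take] at he
    simpa [he] using this
  have hd : (xs.drop k).countP (fun a => a ≤ x) = 0 := by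
    rw [List.countP_eq_zero]
    intro a ha
    obtain ⟨i, hi, he⟩ := List.getElem_of_mem ha
    have hi' : i < xs.length - k := by simpa using hi
    have hil : k + i < xs.length := by omega
    have := h2 (k + i) hil (by omega)
    rw [List.getElem_drop] at he
    simp [← he]
    omega
  rw [ht, hd, List.length_take]
  omega

-- bisect_left on a sorted list counts the elements < x.
theorem pv_bisectLeft_countP (xs : List Int) (x : Int)
    (hs : xs.Pairwise (fun a b => a ≤ b)) :
    PySem.List.bisectLeft xs x = xs.countP (fun a => a < x) := by
  obtain ⟨hk, h1, h2⟩ := PySem.List.bisectLeft_spec xs x hs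
  set k := PySem.List.bisectLeft xs x with hkdef
  rw [← List.take_append_drop k xs, List.countP_append]
  have ht : (xs.take k).countP (fun a => a < x) = (xs.take k).length := by
    rw [List.countP_eq_length]
    intro a ha
    obtain ⟨i, hi, he⟩ := List.getElem_of_mem ha
    have hi' : i < k ∧ i < xs.length := by simpa using hi
    have hil : i < xs.length := hi'.2
    have := h1 i hil hi'.1
    simp only [List.getElem_take] at he
    simpa [he] using this
  have hd : (xs.drop k).countP (fun a => a < x) = 0 := by
    rw [List.countP_eq_zero]
    intro a ha
    obtain ⟨i, hi, he⟩ := List.getElem_of_mem ha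
    have hi' : i < xs.length - k := by simpa using hi
    have hil : k + i < xs.length := by omega
    have := h2 (k + i) hil (by omega)
    rw [List.getElem_drop] at he
    simp [← he]
    omega
  rw [ht, hd, List.length_take]
  omega

-- B's inner counting loop computes the two counts.
theorem pv_counts (lr : List (Int × Int)) (s : Int × Int) (a b : Int) :
    lr.foldl
        (fun (c : Int × Int) t =>
          ((if t.1 ≤ s.2 then c.1 + 1 else c.1), (if t.2 < s.1 then c.2 + 1 else c.2)))
        (a, b)
      = (a + lr.countP (fun t => t.1 ≤ s.2), b + lr.countP (fun t => t.2 < s.1)) := by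
  induction lr generalizing a b with
  | nil => simp
  | cons h t ih =>
    simp only [List.foldl_cons, ih, List.countP_cons, Prod.mk.injEq, decide_eq_true_eq]
    constructor <;> (split_ifs <;> push_cast <;> ring)

-- Per key, A's bisect formula equals B's counting formula.
theorem pv_value_eq (lr : List (Int × Int)) (s : Int × Int) :
    (PySem.List.bisectRight (PySem.List.sorted (lr.map Prod.fst) (fun x => x) false) s.2 : Int) - 1
      - (PySem.List.bisectLeft (PySem.List.sorted (lr.map Prod.snd) (fun x => x) false) s.1 : Int)
    = (lr.countP (fun t => t.1 ≤ s.2) : Int) - (lr.countP (fun t => t.2 < s.1) : Int) - 1 := by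
  have hsl : (PySem.List.sorted (lr.map Prod.fst) (fun x => x) false).Pairwise (fun a b => a ≤ b) := by
    simpa using PySem.List.sorted_pairwise (lr.map Prod.fst) (fun x => x)
  have hsr : (PySem.List.sorted (lr.map Prod.snd) (fun x => x) false).Pairwise (fun a b => a ≤ b) := by
    simpa using PySem.List.sorted_pairwise (lr.map Prod.snd) (fun x => x)
  rw [pv_bisectRight_countP _ _ hsl, pv_bisectLeft_countP _ _ hsr,
    (PySem.List.sorted_perm (lr.map Prod.fst) (fun x => x) false).countP_eq,
    (PySem.List.sorted_perm (lr.map Prod.snd) (fun x => x) false).countP_eq,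
    List.countP_map, List.countP_map]
  simp only [Function.comp_def]
  omega

-- ===== VERDICT (by name: the statement is the Claim_ definition above) =====
theorem numberOfSegmentsForAllSegments_spec : Claim_equal_numberOfSegmentsForAllSegments := by
  intro lr _
  unfold Spec_numberOfSegmentsForAllSegments numberOfSegmentsForAllSegments numberOfSegmentsForAllSegments_alt
  simp only [pv_endpoints, List.nil_append, pv_counts, zero_add]
  congr 1
  apply congrArg PySem.Dict.items
  apply PySem.List.foldl_congr_mem
  intro d s _
  rw [pv_value_eq lr s]
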